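-- pv_equiv track=rewrite | github.com/nikifori/Apella-plus-thesis | embeddings_py/metrics.py | coverage_rank
-- ===== SOURCE A (Python) =====
-- def coverage_rank(authors_target_all: list, pred_ranking: list):
--
--     coverage = len(pred_ranking)
--     target_count=0
--
--     for i, author in enumerate(pred_ranking):
--         if author in authors_target_all:
--             coverage = i+1
--             target_count += 1
--
--     return coverage if target_count == len(authors_target_all) else len(pred_ranking)
-- ===== SOURCE B (Python) =====
-- def coverage_rank(authors_target_all: list, pred_ranking: list):
--     target_count = sum(1 for a in pred_ranking if a in authors_target_all)
--     n = len(pred_ranking)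
--     if target_count != len(authors_target_all):
--         return n
--     for i, a in enumerate(reversed(pred_ranking)):
--         if a in authors_target_all:
--             return n - i
--     return n
-- ===== Notes on version B (the rewrite author's own statement) =====
-- stated objective: alternative
-- what changed: A's single forward pass maintaining (coverage, target_count) is replaced by a counting pass followed by a reverse early-exit scan that returns at the first (i.e. last-in-order) matching author.
import Mathlib
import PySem

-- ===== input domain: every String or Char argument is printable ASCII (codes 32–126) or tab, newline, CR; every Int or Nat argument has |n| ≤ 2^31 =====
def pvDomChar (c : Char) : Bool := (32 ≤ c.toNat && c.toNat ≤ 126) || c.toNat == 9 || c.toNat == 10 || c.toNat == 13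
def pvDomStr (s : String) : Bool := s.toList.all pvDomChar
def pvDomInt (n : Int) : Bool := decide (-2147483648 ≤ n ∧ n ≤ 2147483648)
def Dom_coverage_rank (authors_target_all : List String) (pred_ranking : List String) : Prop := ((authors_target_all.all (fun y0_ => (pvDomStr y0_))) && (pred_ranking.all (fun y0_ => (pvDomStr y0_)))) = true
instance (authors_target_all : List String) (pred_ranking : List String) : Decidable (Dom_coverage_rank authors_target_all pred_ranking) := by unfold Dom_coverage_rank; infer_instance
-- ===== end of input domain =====

-- B replaces A's single forward pass keeping (coverage, target_count) by a counting pass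
-- plus a reverse early-exit scan (objective: alternative decomposition, same cost).


-- ===== PORT A =====
-- A's for-loop over enumerate(pred_ranking) with state (coverage, target_count);
-- the enumerate index is carried as the explicit counter i.
def coverageLoop (t : List String) : List String → Int → Int × Int → Int × Int
  | [], _, s => s
  | a :: rest, i, s =>
    coverageLoop t rest (i + 1) (if a ∈ t then (i + 1, s.2 + 1) else s)

def coverage_rank (authors_target_all : List String) (pred_ranking : List String) : Int :=
  let s := coverageLoop authors_target_all pred_ranking 0 ((pred_ranking.length : Int), 0)
  if s.2 = (authors_target_all.length : Int) then s.1 else (pred_ranking.length : Int)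

-- ===== PORT B =====
-- B's reverse loop: for i, a in enumerate(reversed(pred_ranking)): if a in t: return n - i
def revScan (t : List String) (n : Int) : Int → List String → Int
  | _, [] => n
  | i, a :: rest => if a ∈ t then n - i else revScan t n (i + 1) rest

def coverage_rank_alt (authors_target_all : List String) (pred_ranking : List String) : Int :=
  let target_count : Int := pred_ranking.foldl (fun c a => if a ∈ authors_target_all then c + 1 else c) 0
  let n : Int := pred_ranking.length
  if target_count ≠ (authors_target_all.length : Int) then n
  else revScan authors_target_all n 0 pred_ranking.reverse

-- ===== PRECONDITION & SPEC =====
def Spec_coverage_rank (authors_target_all : List String) (pred_ranking : List String) (out : Int) : Prop := out = coverage_rank_alt authors_target_all pred_ranking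
instance (authors_target_all : List String) (pred_ranking : List String) (out : Int) : Decidable (Spec_coverage_rank authors_target_all pred_ranking out) := by unfold Spec_coverage_rank; infer_instance

-- ===== CLAIM (what is proved, stated in full; the proofs are below) =====
def Claim_equal_coverage_rank : Prop := ∀ (authors_target_all : List String) (pred_ranking : List String), Dom_coverage_rank authors_target_all pred_ranking → Spec_coverage_rank authors_target_all pred_ranking (coverage_rank authors_target_all pred_ranking)

-- ===== LEMMAS AND PROOFS =====

-- A's count component is the number of matches plus the initial count.
theorem coverageLoop_snd (t : List String) (p : List String) :
    ∀ i s, (coverageLoop t p i s).2 = s.2 + (p.countP (fun a => a ∈ t) : Int) := by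
  induction p with
  | nil => intro i s; simp [coverageLoop, List.countP]
  | cons a rest ih =>
    intro i s
    by_cases h : a ∈ t <;>
      first
      | (simp [coverageLoop, h, ih, List.countP_cons]; ring)
      | simp [coverageLoop, h, ih, List.countP_cons]

-- B's counting pass computes the same count.
theorem bCount (t : List String) (p : List String) :
    ∀ c : Int, p.foldl (fun c a => if a ∈ t then c + 1 else c) c
      = c + (p.countP (fun a => a ∈ t) : Int) := by
  induction p with
  | nil => intro c; simp
  | cons a rest ih =>
    intro c
    by_cases h : a ∈ t <;>
      first
      | (simp [h, ih, List.countP_cons]; ring)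
      | simp [h, ih, List.countP_cons]

-- Appending one element to the scanned list: the coverage component.
theorem coverageLoop_fst_append (t : List String) (p : List String) (a : String) :
    ∀ i s, (coverageLoop t (p ++ [a]) i s).1
      = if a ∈ t then i + (p.length : Int) + 1 else (coverageLoop t p i s).1 := by
  induction p with
  | nil =>
    intro i s
    by_cases h : a ∈ t <;> simp [coverageLoop, h]
  | cons b rest ih =>
    intro i s
    by_cases h : a ∈ t <;>
      first
      | (simp [coverageLoop, ih, h]; push_cast; ring)
      | simp [coverageLoop, ih, h]

-- revScan ignores the index when nothing matches.
theorem revScan_nomatch (t : List String) (l : List String)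
    (h : ∀ x ∈ l, x ∉ t) : ∀ n i, revScan t n i l = n := by
  induction l with
  | nil => intro n i; simp [revScan]
  | cons a rest ih =>
    intro n i
    have ha : a ∉ t := h a (by simp)
    rw [show revScan t n i (a :: rest) = revScan t n (i + 1) rest from by simp [revScan, ha]]
    exact ih (fun x hx => h x (by simp [hx])) n (i + 1)

-- Shifting both the bound and the index by one.
theorem revScan_shift (t : List String) (l : List String) :
    ∀ n i, revScan t (n + 1) (i + 1) l
      = if l.any (fun x => decide (x ∈ t)) then revScan t n i l else n + 1 := by
  induction l with
  | nil => intro n i; simp [revScan]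
  | cons a rest ih =>
    intro n i
    by_cases h : a ∈ t <;>
      first
      | (simp [revScan, h, ih n (i + 1)]; ring)
      | (simp [revScan, h, ih n (i + 1)])

-- Main bridge: A's coverage component equals B's reverse scan when some author
-- matches, and the initial coverage value otherwise.
theorem coverageLoop_fst_revScan (t : List String) (p : List String) :
    ∀ c k : Int, (coverageLoop t p 0 (c, k)).1
      = if p.any (fun x => decide (x ∈ t)) then revScan t (p.length : Int) 0 p.reverse else c := by
  induction p using List.reverseRecOn with
  | nil => intro c k; simp [coverageLoop, revScan]
  | append_singleton p a ih =>
    intro c k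
    rw [coverageLoop_fst_append]
    have hrev : (p ++ [a]).reverse = a :: p.reverse := by simp
    have hlen : (((p ++ [a]).length : Int)) = (p.length : Int) + 1 := by
      push_cast [List.length_append, List.length_singleton]; ring
    rw [hrev, hlen]
    by_cases h : a ∈ t
    · simp [revScan, h]
    · have hany : (p ++ [a]).any (fun x => decide (x ∈ t))
          = p.any (fun x => decide (x ∈ t)) := by simp [h]
      have hstep : revScan t ((p.length : Int) + 1) 0 (a :: p.reverse)
          = revScan t ((p.length : Int) + 1) (0 + 1) p.reverse := by
        simp [revScan, h]
      rw [hany, hstep, revScan_shift t p.reverse (p.length : Int) 0,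
          List.any_reverse, ih c k]
      by_cases hp : p.any (fun x => decide (x ∈ t)) <;> simp [h, hp]

-- ===== VERDICT (by name: the statement is the Claim_ definition above) =====
theorem coverage_rank_spec : Claim_equal_coverage_rank := by
  intro t p _
  show coverage_rank t p = coverage_rank_alt t p
  simp only [coverage_rank, coverage_rank_alt, coverageLoop_snd t p,
    bCount t p, coverageLoop_fst_revScan t p, zero_add]
  by_cases hc : ((p.countP (fun a => a ∈ t) : Int)) = (t.length : Int)
  · simp only [hc, if_pos, ne_eq, not_true_eq_false, if_false, if_true, ite_not]
    by_cases hp : p.any (fun x => decide (x ∈ t))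
    · simp [hp]
    · have hp' : p.any (fun x => decide (x ∈ t)) = false := by simpa using hp
      have hno : ∀ x ∈ p.reverse, x ∉ t := by
        intro x hx hxt
        rw [List.mem_reverse] at hx
        have hx' : p.any (fun x => decide (x ∈ t)) = true :=
          List.any_eq_true.mpr ⟨x, hx, by simp [hxt]⟩
        simp [hx'] at hp'
      rw [if_neg (by simp [hp']), revScan_nomatch t p.reverse hno]
  · simp [hc]
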